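-- pv_equiv track=rewrite | github.com/McChuck05/OISC3 | oisc3_parser.py | expand_literals
-- ===== SOURCE A (Python) =====
-- def expand_literals(string):
--     in_dq_literal = False       # "
--     in_sq_literal = False       # '
--     expanded_string = ""
--     for char in string:
--         if char == '"' and not in_sq_literal:
--             in_dq_literal ^= True
--         elif char == "'" and not in_dq_literal:
--             in_sq_literal ^= True
--         elif in_dq_literal or in_sq_literal:
--             expanded_string += str(ord(char)) + ' '
--         else:
--             expanded_string += char
--     return expanded_string
-- ===== SOURCE B (Python) =====
-- def expand_literals(string):
--     out = []
--     i = 0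
--     n = len(string)
--     while i < n:
--         c = string[i]
--         if c == '"' or c == "'":
--             i += 1
--             while i < n and string[i] != c:
--                 out.append(str(ord(string[i])) + ' ')
--                 i += 1
--             i += 1  # skip closing delimiter (or move past end)
--         else:
--             out.append(c)
--             i += 1
--     return ''.join(out)
-- ===== Notes on version B (the rewrite author's own statement) =====
-- stated objective: alternative
-- what changed: Replaced A's flat per-character scan with two boolean in-literal flags by an index walk with an outer copy loop and an inner ord-emitting loop keyed by the active delimiter, joining collected pieces at the end.
import Mathlib
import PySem

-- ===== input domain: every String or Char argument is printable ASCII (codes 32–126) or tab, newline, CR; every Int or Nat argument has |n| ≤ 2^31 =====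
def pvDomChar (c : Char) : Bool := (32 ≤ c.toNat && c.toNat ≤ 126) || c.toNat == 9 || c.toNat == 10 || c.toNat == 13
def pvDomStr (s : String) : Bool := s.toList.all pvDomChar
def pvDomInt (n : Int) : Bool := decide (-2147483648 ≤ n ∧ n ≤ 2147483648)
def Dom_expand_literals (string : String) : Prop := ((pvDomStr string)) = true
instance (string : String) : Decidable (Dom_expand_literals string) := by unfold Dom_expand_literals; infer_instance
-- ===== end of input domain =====

-- B rewrites A's flat two-boolean-flag state machine as an outer scan with an inner literal-consuming loop keyed by the active delimiter (objective: alternative decomposition, same cost).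

-- ===== PORT A =====
-- state = (in_dq_literal, in_sq_literal, expanded_string as List Char)
def pvStepA (st : Bool × Bool × List Char) (c : Char) : Bool × Bool × List Char :=
  if c = '"' ∧ st.2.1 = false then (!st.1, st.2.1, st.2.2)
  else if c = '\'' ∧ st.1 = false then (st.1, !st.2.1, st.2.2)
  else if st.1 || st.2.1 then (st.1, st.2.1, st.2.2 ++ PySem.Int.toChars (c.toNat : Int) ++ [' '])
  else (st.1, st.2.1, st.2.2 ++ [c])

def expand_literals (string : String) : String :=
  String.ofList (string.toList.foldl pvStepA (false, false, [])).2.2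

-- ===== PORT B =====
-- outer loop: copy chars until a quote starts a literal; inner loop: emit "ord " codes until the matching delimiter (or end of input)
mutual
def pvOuterB : List Char → List Char
  | [] => []
  | c :: rest => if c = '"' ∨ c = '\'' then pvInnerB c rest else c :: pvOuterB rest
def pvInnerB (d : Char) : List Char → List Char
  | [] => []
  | c :: rest => if c = d then pvOuterB rest
                 else PySem.Int.toChars (c.toNat : Int) ++ ' ' :: pvInnerB d rest
end

def expand_literals_alt (string : String) : String :=
  String.ofList (pvOuterB string.toList)

-- ===== PRECONDITION & SPEC =====
def Spec_expand_literals (string : String) (out : String) : Prop := out = expand_literals_alt string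
instance (string : String) (out : String) : Decidable (Spec_expand_literals string out) := by unfold Spec_expand_literals; infer_instance

-- ===== CLAIM (what is proved, stated in full; the proofs are below) =====
def Claim_equal_expand_literals : Prop := ∀ (string : String), Dom_expand_literals string → Spec_expand_literals string (expand_literals string)

-- ===== LEMMAS AND PROOFS =====
-- A's reachable states are (F,F) outside literals, (T,F) inside a "-literal, (F,T) inside a '-literal;
-- they correspond to B's outer loop and inner loop with delimiter '"' resp. '\''.
lemma pv_fold_eq (l : List Char) : ∀ acc : List Char,
    (l.foldl pvStepA (false, false, acc)).2.2 = acc ++ pvOuterB l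
    ∧ (l.foldl pvStepA (true, false, acc)).2.2 = acc ++ pvInnerB '"' l
    ∧ (l.foldl pvStepA (false, true, acc)).2.2 = acc ++ pvInnerB '\'' l := by
  induction l with
  | nil => intro acc; simp [pvOuterB, pvInnerB]
  | cons c rest ih =>
    intro acc
    by_cases hdq : c = '"'
    · subst hdq
      simp only [List.foldl_cons, pvStepA, pvOuterB, pvInnerB]
      refine ⟨?_, ?_, ?_⟩
      · simpa using (ih acc).2.1
      · simpa using (ih acc).1
      · simpa using (ih (acc ++ PySem.Int.toChars ('"'.toNat : Int) ++ [' '])).2.2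
    · by_cases hsq : c = '\''
      · subst hsq
        simp only [List.foldl_cons, pvStepA, pvOuterB, pvInnerB]
        refine ⟨?_, ?_, ?_⟩
        · simpa using (ih acc).2.2
        · simpa [hdq] using (ih (acc ++ PySem.Int.toChars ('\''.toNat : Int) ++ [' '])).2.1
        · simpa using (ih acc).1
      · simp only [List.foldl_cons, pvStepA, pvOuterB, pvInnerB, hdq, hsq]
        refine ⟨?_, ?_, ?_⟩
        · simpa using (ih (acc ++ [c])).1
        · simpa [hdq, hsq] using (ih (acc ++ PySem.Int.toChars (c.toNat : Int) ++ [' '])).2.1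
        · simpa [hdq, hsq] using (ih (acc ++ PySem.Int.toChars (c.toNat : Int) ++ [' '])).2.2

-- ===== VERDICT (by name: the statement is the Claim_ definition above) =====
theorem expand_literals_spec : Claim_equal_expand_literals := by
  intro s _
  show _ = _
  unfold expand_literals expand_literals_alt
  rw [(pv_fold_eq s.toList []).1]
  simp
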